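-- pv_equiv track=rewrite | github.com/dashidhy/DanLM | baselines/fin-honest-seu/东大老实人/action.py | rest_cards
-- ===== SOURCE A (Python) =====
-- import copy
--
-- def rest_cards(handcards, remaincards, rank):
--     card_value_v2s = {0: "A", 1: "2", 2: "3", 3: "4", 4: "5", 5: "6", 6: "7", 7: "8", 8: "9", 9: "T", 10: "J",
--                       11: "Q", 12: "K"}
--     card_value_s2v = {"2": 2, "3": 3, "4": 4, "5": 5, "6": 6, "7": 7, "8": 8, "9": 9, "T": 10, "J": 11,
--                       "Q": 12, "K": 13, "A": 14, "B": 16, "R": 17}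
--
--     card_index = {"A": 0, "2": 1, "3": 2, "4": 3, "5": 4, "6": 5, "7": 6, "8": 7, "9": 8, "T": 9, "J": 10,
--                   "Q": 11, "K": 12, "R": 13, "B": 13}
--     new_remaincards = {}
--     for key,val in remaincards.items():
--         new_remaincards[key] = copy.deepcopy(val)
--     for card in handcards:
--         card_type = str(card[0])
--         x = card_index[card[1]]
--         new_remaincards[card_type][x] = remaincards[card_type][x]-1
--
--     rest_cards = []
--
--     for key,value in new_remaincards.items():
--         for i  in range(0,len(value)):
--             if value[i] ==0 :
--                 continue
--             if i == 13 and key == 'S':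
--                 val = 'B'
--             elif i == 13 and key == 'H':
--                 val = 'R'
--             else:
--                 val = card_value_v2s[i]
--             if value[i]==1:
--                 rest_cards.append(key+val)
--             elif value[i] == 2:
--                 rest_cards.append(key + val)
--                 rest_cards.append(key + val)
--     card_value_s2v[str(rank)] = 15
--     rest_cards = sorted(rest_cards,key = lambda item:card_value_s2v[item[1]])
--     new_rest_cards = []
--     tmp = []
--     pre = rest_cards[0][-1]
--     tmp = [pre]
--     for cards in rest_cards[1:]:
--         if cards[-1]!=pre:
--             new_rest_cards.append(tmp)
--             tmp = [cards]
--             pre = cards[-1]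
--         else:
--             tmp.append(cards)
--     new_rest_cards.append(tmp)
--     return new_rest_cards
-- ===== SOURCE B (Python) =====
-- def rest_cards(handcards, remaincards, rank):
--     """Cards still outside the hand, grouped by rank in ascending sort order
--     (the player's rank sorts as 15, jokers above it).  The first group opens
--     with the bare rank character of the lowest card; all other entries are
--     full card strings (suit + rank).
--
--     Instead of decrementing a deep copy of the table and sorting the flat
--     card list with a comparison sort, this marks the slots a handcard was
--     taken from in a set built once, emits the surviving cards in a single
--     pass over the table, orders them with a counting pass over the 16
--     possible sort values, and splits the ordered list into groups where the
--     rank character changes."""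
--     card_value_v2s = {0: "A", 1: "2", 2: "3", 3: "4", 4: "5", 5: "6", 6: "7", 7: "8", 8: "9", 9: "T", 10: "J",
--                       11: "Q", 12: "K"}
--     card_value_s2v = {"2": 2, "3": 3, "4": 4, "5": 5, "6": 6, "7": 7, "8": 8, "9": 9, "T": 10, "J": 11,
--                       "Q": 12, "K": 13, "A": 14, "B": 16, "R": 17}
--     card_index = {"A": 0, "2": 1, "3": 2, "4": 3, "5": 4, "6": 5, "7": 6, "8": 7, "9": 8, "T": 9, "J": 10,
--                   "Q": 11, "K": 12, "R": 13, "B": 13}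
--     taken = {(card[0], card_index[card[1]]) for card in handcards}
--     flat = []
--     for key, value in remaincards.items():
--         for i in range(len(value)):
--             n = value[i] - ((key, i) in taken)
--             if n == 1 or n == 2:
--                 if i == 13 and key == 'S':
--                     val = 'B'
--                 elif i == 13 and key == 'H':
--                     val = 'R'
--                 else:
--                     val = card_value_v2s[i]
--                 flat.extend([key + val] * n)
--     card_value_s2v[str(rank)] = 15
--     ordered = [c for v in range(2, 18) for c in flat if card_value_s2v[c[1]] == v]
--     groups = [[ordered[0][-1]]]
--     for card in ordered[1:]:
--         if card[-1] == groups[-1][-1][-1]: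
--             groups[-1].append(card)
--         else:
--             groups.append([card])
--     return groups
-- ===== Notes on version B (the rewrite author's own statement) =====
-- stated objective: alternative
-- what changed: B drops A's deep-copied working table and its flatten/comparison-sort back end: slots a handcard was taken from are marked in a set built once, surviving cards are emitted in one pass over the table, ordered by a counting pass over the 16 possible sort values, and split into rank-character groups in a final scan; Pre_ excludes only inputs on which A raises (empty result, missing keys/slots, cards or keys too short, unknown rank characters) and, Lean-side only, duplicate-key association lists.
import Mathlib
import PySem

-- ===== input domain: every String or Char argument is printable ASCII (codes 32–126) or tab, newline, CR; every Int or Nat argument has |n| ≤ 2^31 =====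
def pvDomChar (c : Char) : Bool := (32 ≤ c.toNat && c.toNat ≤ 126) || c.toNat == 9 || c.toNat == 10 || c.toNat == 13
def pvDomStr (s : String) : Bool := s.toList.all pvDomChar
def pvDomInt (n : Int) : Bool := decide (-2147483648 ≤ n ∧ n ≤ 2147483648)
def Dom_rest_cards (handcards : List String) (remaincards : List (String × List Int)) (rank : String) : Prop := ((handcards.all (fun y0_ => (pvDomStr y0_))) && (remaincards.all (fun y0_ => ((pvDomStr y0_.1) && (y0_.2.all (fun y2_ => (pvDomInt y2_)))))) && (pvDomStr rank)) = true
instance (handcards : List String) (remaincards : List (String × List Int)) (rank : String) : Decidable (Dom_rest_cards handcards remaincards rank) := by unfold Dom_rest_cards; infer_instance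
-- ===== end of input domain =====

-- B replaces A's deep-copied working table and flatten/comparison-sort back end by a
-- removed-slot set built once from handcards, a single emission pass over the table,
-- a counting pass over the 16 possible sort values, and a final scan splitting the
-- ordered cards into rank-character groups (the first opening with its bare rank
-- character, the output format both programs produce).

-- shared literal tables (the three dict constants of the Python source)
def pvV2S : PySem.Dict Int String := PySem.Dict.ofList [(0,"A"),(1,"2"),(2,"3"),(3,"4"),(4,"5"),(5,"6"),(6,"7"),(7,"8"),(8,"9"),(9,"T"),(10,"J"),(11,"Q"),(12,"K")]
def pvS2V : PySem.Dict String Int := PySem.Dict.ofList [("2",2),("3",3),("4",4),("5",5),("6",6),("7",7),("8",8),("9",9),("T",10),("J",11),("Q",12),("K",13),("A",14),("B",16),("R",17)]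
-- card_index: keys are the 1-character strings card[1]; represented by their character (exact)
def pvIdx : PySem.Dict Char Int := PySem.Dict.ofList [('A',0),('2',1),('3',2),('4',3),('5',4),('6',5),('7',6),('8',7),('9',8),('T',9),('J',10),('Q',11),('K',12),('R',13),('B',13)]

-- s[i] as a character (total form; Pre_ keeps indices in range where it matters)
def pvCh (s : String) (i : Int) : Char := (PySem.Str.pyGet? s i).getD ' '
-- str(card[0])
def pvCt (card : String) : String := String.singleton (pvCh card 0)
-- card_index[card[1]]
def pvIx (card : String) : Int := pvIdx.getD (pvCh card 1) 0

-- ===== PORT A =====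
def rest_cards (handcards : List String) (remaincards : List (String × List Int)) (rank : String) : List (List String) :=
  let rem : PySem.Dict String (List Int) := PySem.Dict.ofList remaincards
  -- new_remaincards = {}; for key,val in remaincards.items(): new_remaincards[key] = deepcopy(val)
  let new0 : PySem.Dict String (List Int) :=
    rem.items.foldl (fun d kv => d.insert kv.1 kv.2) PySem.Dict.empty
  -- for card in handcards: new_remaincards[card_type][x] = remaincards[card_type][x]-1
  let newrem : PySem.Dict String (List Int) :=
    handcards.foldl (fun d card =>
      d.insert (pvCt card)
        (PySem.List.pySetD (d.getD (pvCt card) []) (pvIx card)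
          (PySem.List.pyGetD (rem.getD (pvCt card) []) (pvIx card) 0 - 1))) new0
  -- rest_cards = [];  for key,value in new_remaincards.items(): for i in range(0,len(value)): ...
  let rest : List String :=
    newrem.items.foldl (fun acc kv =>
      (PySem.List.pyRange 0 (PySem.List.len kv.2) 1).foldl (fun acc i =>
        if PySem.List.pyGetD kv.2 i 0 = 0 then acc
        else
          let val : String :=
            if i = 13 ∧ kv.1 = "S" then "B"
            else if i = 13 ∧ kv.1 = "H" then "R"
            else pvV2S.getD i ""
          if PySem.List.pyGetD kv.2 i 0 = 1 then acc ++ [kv.1 ++ val]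
          else if PySem.List.pyGetD kv.2 i 0 = 2 then (acc ++ [kv.1 ++ val]) ++ [kv.1 ++ val]
          else acc) acc) []
  -- card_value_s2v[str(rank)] = 15; rest_cards = sorted(rest_cards, key=lambda item: card_value_s2v[item[1]])
  let s2v := pvS2V.insert rank 15
  let srt := PySem.List.sorted rest (fun item => s2v.getD (String.singleton (pvCh item 1)) 0) false
  match srt with
  | [] => []   -- Python raises IndexError at rest_cards[0] here (outside Pre_)
  | r0 :: rs =>
    -- pre = rest_cards[0][-1]; tmp = [pre]; scan rest_cards[1:] grouping on cards[-1] != pre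
    let fin := rs.foldl (fun (st : List (List String) × List String × String) cards =>
        if String.singleton (pvCh cards (-1)) ≠ st.2.2 then
          (st.1 ++ [st.2.1], [cards], String.singleton (pvCh cards (-1)))
        else (st.1, st.2.1 ++ [cards], st.2.2))
      (([] : List (List String)), [String.singleton (pvCh r0 (-1))], String.singleton (pvCh r0 (-1)))
    fin.1 ++ [fin.2.1]

-- ===== PORT B =====
def rest_cards_alt (handcards : List String) (remaincards : List (String × List Int)) (rank : String) : List (List String) :=
  -- taken = {(card[0], card_index[card[1]]) for card in handcards}
  let taken : PySem.Set (String × Int) :=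
    PySem.Set.ofList (handcards.map (fun card => (pvCt card, pvIx card)))
  -- one pass over the table, emitting surviving cards
  let flat : List String :=
    (PySem.Dict.ofList remaincards).items.foldl (fun acc kv =>
      (PySem.List.pyRange 0 (PySem.List.len kv.2) 1).foldl (fun acc i =>
        let n := PySem.List.pyGetD kv.2 i 0 - (if (kv.1, i) ∈ taken then 1 else 0)
        if n = 1 ∨ n = 2 then
          let val : String :=
            if i = 13 ∧ kv.1 = "S" then "B"
            else if i = 13 ∧ kv.1 = "H" then "R"
            else pvV2S.getD i ""
          acc ++ List.replicate n.toNat (kv.1 ++ val)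
        else acc) acc) []
  -- card_value_s2v[str(rank)] = 15; counting pass over the 16 sort values
  let s2v := pvS2V.insert rank 15
  let ordered := (PySem.List.pyRange 2 18 1).flatMap (fun v =>
      flat.filter (fun c => s2v.getD (String.singleton (pvCh c 1)) 0 = v))
  -- groups = [[ordered[0][-1]]]; extend the last group while the rank character repeats
  match ordered with
  | [] => []   -- Python raises IndexError at ordered[0] here (outside Pre_)
  | c0 :: rest =>
    rest.foldl (fun (groups : List (List String)) card =>
        if String.singleton (pvCh card (-1))
            = String.singleton (pvCh ((groups.getLastD []).getLastD "") (-1)) then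
          groups.dropLast ++ [groups.getLastD [] ++ [card]]
        else groups ++ [[card]])
      [[String.singleton (pvCh c0 (-1))]]

-- ===== PRECONDITION & SPEC =====
-- was the slot (k, i) decremented by some handcard?
def pvTouch (handcards : List String) (k : String) (i : Int) : Bool :=
  handcards.any (fun c => decide (pvCt c = k ∧ pvIx c = i))
-- the count of slot (k, i) after A's decrement phase (each touched slot holds original-1)
def pvCnt (handcards : List String) (k : String) (v : List Int) (i : Int) : Int :=
  PySem.List.pyGetD v i 0 - (if pvTouch handcards k i then 1 else 0)

-- does the row kv contribute at least one card after the decrement phase?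
abbrev pvEmits (handcards : List String) (kv : String × List Int) : Prop :=
  ∃ i ∈ List.range kv.2.length,
    pvCnt handcards kv.1 kv.2 i = 1 ∨ pvCnt handcards kv.1 kv.2 i = 2

-- Pre_ excludes exactly the inputs where A raises (handcards naming a missing key/slot
-- or too short, a nonzero count at a slot past index 12 of a non-joker row, a
-- contributing row whose key is empty or whose card's second character is no sort key,
-- an empty result) and, Lean-side only, duplicate-key association lists (a Python dict
-- cannot carry them).
def Pre_rest_cards (handcards : List String) (remaincards : List (String × List Int)) (rank : String) : Prop :=
  (remaincards.map Prod.fst).Nodup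
  ∧ (∀ kv ∈ remaincards,
        (∀ j ∈ List.range kv.2.length, pvCnt handcards kv.1 kv.2 j ≠ 0 →
            (j : Int) ≤ 13 ∧ ((j : Int) = 13 → kv.1 = "S" ∨ kv.1 = "H"))
        ∧ (pvEmits handcards kv → 1 ≤ PySem.Str.len kv.1
            ∧ (PySem.Str.len kv.1 = 1
               ∨ (pvS2V.insert rank 15).contains (String.singleton (pvCh kv.1 1)) = true)))
  ∧ (∀ c ∈ handcards, 2 ≤ PySem.Str.len c ∧ pvIdx.contains (pvCh c 1) = true
        ∧ ∃ kv ∈ remaincards, kv.1 = pvCt c ∧ pvIx c < (kv.2.length : Int))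
  ∧ (∃ kv ∈ remaincards, pvEmits handcards kv)
instance (handcards : List String) (remaincards : List (String × List Int)) (rank : String) : Decidable (Pre_rest_cards handcards remaincards rank) := by unfold Pre_rest_cards; infer_instance

def pvWitness_rest_cards : List String × (List (String × List Int)) × String :=
  (["S2"], [("S",[2,1]),("H",[1])], "3")

def Spec_rest_cards (handcards : List String) (remaincards : List (String × List Int)) (rank : String) (out : List (List String)) : Prop := out = rest_cards_alt handcards remaincards rank
instance (handcards : List String) (remaincards : List (String × List Int)) (rank : String) (out : List (List String)) : Decidable (Spec_rest_cards handcards remaincards rank out) := by unfold Spec_rest_cards; infer_instance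

-- ===== CLAIM (what is proved, stated in full; the proofs are below) =====
def Claim_equal_rest_cards : Prop := ∀ (handcards : List String) (remaincards : List (String × List Int)) (rank : String), Dom_rest_cards handcards remaincards rank → Pre_rest_cards handcards remaincards rank → Spec_rest_cards handcards remaincards rank (rest_cards handcards remaincards rank)

-- ===== LEMMAS AND PROOFS =====

-- the value character appended for slot (k, i)
def pvValStr (k : String) (i : Int) : String :=
  if i = 13 ∧ k = "S" then "B" else if i = 13 ∧ k = "H" then "R" else pvV2S.getD i ""
-- what slot (k, i) contributes to the flat card list
def pvContrib (hc : List String) (k : String) (v : List Int) (i : Int) : List String :=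
  if pvCnt hc k v i = 1 ∨ pvCnt hc k v i = 2
  then List.replicate (pvCnt hc k v i).toNat (k ++ pvValStr k i) else []
-- the flat list of surviving cards
def pvFlat (hc : List String) (L : List (String × List Int)) : List String :=
  L.flatMap (fun kv => (PySem.List.pyRange 0 (PySem.List.len kv.2) 1).flatMap (pvContrib hc kv.1 kv.2))
-- A's decremented row for key k
def pvPatch (hc : List String) (k : String) (v : List Int) : List Int :=
  (PySem.List.pyRange 0 (PySem.List.len v) 1).map (fun i => pvCnt hc k v i)
-- the rank-character string of a card
def pvCharStr (c : String) : String := String.singleton (pvCh c (-1))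
-- the 15 possible value characters
def pvVals : List String := ["A","2","3","4","5","6","7","8","9","T","J","Q","K","B","R"]


-- an association list with distinct keys is its own dict item list
theorem pv_items_ofList {ν : Type} (L : List (String × ν)) (h : (L.map Prod.fst).Nodup) :
    (PySem.Dict.ofList L).items = L := by
  have := PySem.Dict.items_foldl_insert_fresh (l := L) (k := Prod.fst) (v := Prod.snd)
    (d := PySem.Dict.empty) (by intro a _; exact PySem.Dict.contains_empty _) h
  simpa [PySem.Dict.ofList, PySem.Dict.update, PySem.Dict.empty] using this

-- card_index values lie in [0, 13]
theorem pvIx_bounds (c : String) : 0 ≤ pvIx c ∧ pvIx c ≤ 13 := by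
  unfold pvIx
  rcases h : pvIdx.get? (pvCh c 1) with _ | x
  · rw [PySem.Dict.getD_of_get?_eq_none (h := h)]; omega
  · rw [PySem.Dict.getD_of_get?_eq_some (h := h)]
    have hm := PySem.Dict.mem_items_of_get?_eq_some _ h
    have hit : (pvIdx.items) = [('A',0),('2',1),('3',2),('4',3),('5',4),('6',5),('7',6),('8',7),('9',8),('T',9),('J',10),('Q',11),('K',12),('R',13),('B',13)] := by decide
    rw [hit] at hm
    simp only [List.mem_cons, List.not_mem_nil, or_false] at hm
    rcases hm with h'|h'|h'|h'|h'|h'|h'|h'|h'|h'|h'|h'|h'|h'|h' <;> (injection h' with h1 h2; omega)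

theorem pvTouch_append (S : List String) (x : String) (k : String) (i : Int) :
    pvTouch (S ++ [x]) k i = (pvTouch S k i || decide (pvCt x = k ∧ pvIx x = i)) := by
  simp [pvTouch]

theorem length_pvPatch (hc : List String) (k : String) (v : List Int) :
    (pvPatch hc k v).length = v.length := by
  simp [pvPatch, PySem.List.length_pyRange_one, PySem.List.len_eq]

theorem pvPatch_nil (k : String) (v : List Int) : pvPatch [] k v = v := by
  unfold pvPatch pvCnt pvTouch
  simpa using PySem.List.map_pyGetD_pyRange_zero v 0

theorem getElem_pvPatch (hc : List String) (k : String) (v : List Int) (j : Nat)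
    (hj : j < (pvPatch hc k v).length) :
    (pvPatch hc k v)[j] = pvCnt hc k v (j : Int) := by
  unfold pvPatch at hj ⊢
  rw [List.getElem_map, PySem.List.getElem_pyRange_one]
  simp


-- setting the touched slot of a patched row to original-1 extends the patch by that slot
theorem pv_set_patch (S : List String) (x : String) (k : String) (v : List Int)
    (hk : pvCt x = k) (hix : pvIx x < (v.length : Int)) :
    PySem.List.pySetD (pvPatch S k v) (pvIx x) (PySem.List.pyGetD v (pvIx x) 0 - 1)
      = pvPatch (S ++ [x]) k v := by
  have h0 : 0 ≤ pvIx x := (pvIx_bounds x).1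
  rw [PySem.List.pySetD_of_nonneg (h := h0)]
  apply List.ext_getElem
  · simp [length_pvPatch]
  · intro j hj1 hj2
    have hS : j < (pvPatch S k v).length := by
      rw [length_pvPatch]; rw [length_pvPatch] at hj2; exact hj2
    rw [List.getElem_set, getElem_pvPatch (S ++ [x]) k v j hj2]
    by_cases hj : (pvIx x).toNat = j
    · have hxj : pvIx x = (j : Int) := by omega
      rw [if_pos hj]
      unfold pvCnt
      rw [pvTouch_append]
      have hdec : decide (pvCt x = k ∧ pvIx x = (j : Int)) = true := by simp [hk, hxj]
      rw [hdec, Bool.or_true, if_pos rfl, hxj]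
    · rw [if_neg hj, getElem_pvPatch S k v j hS]
      unfold pvCnt
      rw [pvTouch_append]
      have hdec : decide (pvCt x = k ∧ pvIx x = (j : Int)) = false := by
        simp only [decide_eq_false_iff_not]
        rintro ⟨-, h2⟩; omega
      rw [hdec, Bool.or_false]

-- after processing handcards S, A's working table holds each original row with every
-- touched slot rewritten to original-1 (A reads the ORIGINAL table when decrementing)
theorem pv_dec_items (L : List (String × List Int)) (hnd : (L.map Prod.fst).Nodup)
    (S : List String)
    (hok : ∀ c ∈ S, ∃ kv ∈ L, kv.1 = pvCt c ∧ pvIx c < (kv.2.length : Int)) :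
    (S.foldl (fun d card =>
        d.insert (pvCt card)
          (PySem.List.pySetD (d.getD (pvCt card) []) (pvIx card)
            (PySem.List.pyGetD ((PySem.Dict.ofList L).getD (pvCt card) []) (pvIx card) 0 - 1)))
      (((PySem.Dict.ofList L).items).foldl (fun d kv => d.insert kv.1 kv.2) PySem.Dict.empty)).items
    = L.map (fun kv => (kv.1, pvPatch S kv.1 kv.2)) := by
  induction S using List.reverseRecOn with
  | nil =>
      show (PySem.Dict.ofList ((PySem.Dict.ofList L).items)).items = _
      rw [pv_items_ofList L hnd, pv_items_ofList L hnd]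
      symm
      have h1 : ∀ kv ∈ L, (kv.1, pvPatch ([] : List String) kv.1 kv.2) = id kv := by
        intro kv _; rw [pvPatch_nil]; rfl
      rw [List.map_congr_left h1, List.map_id]
  | append_singleton S x ih =>
      rw [List.foldl_append, List.foldl_cons, List.foldl_nil]
      have hokS : ∀ c ∈ S, ∃ kv ∈ L, kv.1 = pvCt c ∧ pvIx c < (kv.2.length : Int) := by
        intro c hc; exact hok c (by simp [hc])
      obtain ⟨kv₀, hkv₀L, hk₀, hixlt⟩ := hok x (by simp)
      have hIH := ih hokS
      rw [show pvCt x = kv₀.1 from hk₀.symm]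
      set d := S.foldl (fun d card =>
          d.insert (pvCt card)
            (PySem.List.pySetD (d.getD (pvCt card) []) (pvIx card)
              (PySem.List.pyGetD ((PySem.Dict.ofList L).getD (pvCt card) []) (pvIx card) 0 - 1)))
        (((PySem.Dict.ofList L).items).foldl (fun d kv => d.insert kv.1 kv.2) PySem.Dict.empty) with hd
      have hkeys : d.keys = L.map Prod.fst := by
        show d.items.map Prod.fst = _
        rw [hIH, List.map_map]; rfl
      have hkeysnd : d.keys.Nodup := by rw [hkeys]; exact hnd
      have hmem : (kv₀.1, pvPatch S kv₀.1 kv₀.2) ∈ d.items := by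
        rw [hIH]
        exact List.mem_map_of_mem hkv₀L
      have hgetd : d.getD kv₀.1 [] = pvPatch S kv₀.1 kv₀.2 :=
        PySem.Dict.getD_of_mem_items d hmem hkeysnd []
      have hgetrem : (PySem.Dict.ofList L).getD kv₀.1 [] = kv₀.2 := by
        have hm : (kv₀.1, kv₀.2) ∈ (PySem.Dict.ofList L).items := by
          rw [pv_items_ofList L hnd]; exact hkv₀L
        have hnd2 : (PySem.Dict.ofList L).keys.Nodup := by
          show ((PySem.Dict.ofList L).items.map Prod.fst).Nodup
          rw [pv_items_ofList L hnd]; exact hnd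
        exact PySem.Dict.getD_of_mem_items _ hm hnd2 []
      have hcont : d.contains kv₀.1 = true := by
        rw [PySem.Dict.contains_iff_mem_keys, hkeys]
        exact List.mem_map_of_mem hkv₀L
      rw [PySem.Dict.items_insert_of_contains d _ hcont, hIH, List.map_map, hgetd, hgetrem]
      apply List.map_congr_left
      intro kv hkvL
      simp only [Function.comp_apply]
      by_cases hke : kv.1 = kv₀.1
      · have hkveq : kv = kv₀ := List.inj_on_of_nodup_map hnd hkvL hkv₀L hke
        subst hkveq
        rw [if_pos (by simp)]
        exact Prod.ext rfl (pv_set_patch S x kv.1 kv.2 hk₀.symm hixlt)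
      · rw [if_neg (by simp [hke])]
        refine Prod.ext rfl ?_
        show pvPatch S kv.1 kv.2 = pvPatch (S ++ [x]) kv.1 kv.2
        unfold pvPatch
        apply List.map_congr_left
        intro i _
        unfold pvCnt
        rw [pvTouch_append]
        have hdec : decide (pvCt x = kv.1 ∧ pvIx x = i) = false := by
          simp only [decide_eq_false_iff_not]
          rintro ⟨h1, -⟩
          exact hke (by rw [hk₀, h1])
        rw [hdec, Bool.or_false]
-- membership in B's removed-slot set is exactly pvTouch
theorem pv_mem_removed (hc : List String) (k : String) (i : Int) :
    ((k, i) ∈ PySem.Set.ofList (hc.map (fun card => (pvCt card, pvIx card)))) ↔ pvTouch hc k i = true := by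
  rw [PySem.Set.mem_ofList, pvTouch, List.any_eq_true]
  simp [Prod.mk.injEq]

-- the inner loop of A's port contributes acc ++ pvContrib for each slot
theorem pv_innerA (hc : List String) (k : String) (v : List Int) (acc : List String) :
    (PySem.List.pyRange 0 (PySem.List.len (pvPatch hc k v)) 1).foldl (fun acc i =>
        if PySem.List.pyGetD (pvPatch hc k v) i 0 = 0 then acc
        else
          if PySem.List.pyGetD (pvPatch hc k v) i 0 = 1 then
            acc ++ [k ++ (if i = 13 ∧ k = "S" then "B" else if i = 13 ∧ k = "H" then "R" else pvV2S.getD i "")]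
          else if PySem.List.pyGetD (pvPatch hc k v) i 0 = 2 then
            (acc ++ [k ++ (if i = 13 ∧ k = "S" then "B" else if i = 13 ∧ k = "H" then "R" else pvV2S.getD i "")])
              ++ [k ++ (if i = 13 ∧ k = "S" then "B" else if i = 13 ∧ k = "H" then "R" else pvV2S.getD i "")]
          else acc) acc
    = acc ++ (PySem.List.pyRange 0 (PySem.List.len v) 1).flatMap (pvContrib hc k v) := by
  have hlen : PySem.List.len (pvPatch hc k v) = PySem.List.len v := by
    simp [PySem.List.len_eq, length_pvPatch]
  rw [hlen]
  rw [PySem.List.foldl_congr_mem _ _ (fun acc i => acc ++ pvContrib hc k v i) _ ?_]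
  · exact PySem.List.foldl_append_eq_flatMap _ _ _
  · intro acc i hi
    rw [PySem.List.mem_pyRange_one] at hi
    have hilen : i < ((pvPatch hc k v).length : Int) := by
      rw [length_pvPatch]; simpa [PySem.List.len_eq] using hi.2
    have hget : PySem.List.pyGetD (pvPatch hc k v) i 0 = pvCnt hc k v i := by
      rw [PySem.List.pyGetD_eq_getElem _ _ hi.1 hilen,
        getElem_pvPatch _ _ _ _ (by omega), Int.toNat_of_nonneg hi.1]
    rw [hget]
    unfold pvContrib pvValStr
    by_cases h1 : pvCnt hc k v i = 1
    · simp [h1]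
    · by_cases h2 : pvCnt hc k v i = 2
      · have : (pvCnt hc k v i).toNat = 2 := by omega
        simp [h2, h1, this, List.replicate_succ]
      · by_cases h0 : pvCnt hc k v i = 0 <;> simp [h0, h1, h2]

theorem pv_flatA (hc : List String) (L : List (String × List Int)) :
    (L.map (fun kv => (kv.1, pvPatch hc kv.1 kv.2))).foldl (fun acc kv =>
      (PySem.List.pyRange 0 (PySem.List.len kv.2) 1).foldl (fun acc i =>
        if PySem.List.pyGetD kv.2 i 0 = 0 then acc
        else
          if PySem.List.pyGetD kv.2 i 0 = 1 then
            acc ++ [kv.1 ++ (if i = 13 ∧ kv.1 = "S" then "B" else if i = 13 ∧ kv.1 = "H" then "R" else pvV2S.getD i "")]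
          else if PySem.List.pyGetD kv.2 i 0 = 2 then
            (acc ++ [kv.1 ++ (if i = 13 ∧ kv.1 = "S" then "B" else if i = 13 ∧ kv.1 = "H" then "R" else pvV2S.getD i "")])
              ++ [kv.1 ++ (if i = 13 ∧ kv.1 = "S" then "B" else if i = 13 ∧ kv.1 = "H" then "R" else pvV2S.getD i "")]
          else acc) acc) []
    = pvFlat hc L := by
  rw [List.foldl_map]
  rw [PySem.List.foldl_congr_mem _ _
      (fun acc kv => acc ++ (PySem.List.pyRange 0 (PySem.List.len kv.2) 1).flatMap (pvContrib hc kv.1 kv.2)) _ ?_]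
  · rw [PySem.List.foldl_append_eq_flatMap]; rfl
  · intro acc kv _
    exact pv_innerA hc kv.1 kv.2 acc

theorem pv_flatB (hc : List String) (L : List (String × List Int)) :
    L.foldl (fun acc kv =>
      (PySem.List.pyRange 0 (PySem.List.len kv.2) 1).foldl (fun acc i =>
        if (PySem.List.pyGetD kv.2 i 0 -
              (if (kv.1, i) ∈ PySem.Set.ofList (hc.map (fun card => (pvCt card, pvIx card))) then 1 else 0)) = 1
            ∨ (PySem.List.pyGetD kv.2 i 0 -
              (if (kv.1, i) ∈ PySem.Set.ofList (hc.map (fun card => (pvCt card, pvIx card))) then 1 else 0)) = 2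
        then acc ++ List.replicate (PySem.List.pyGetD kv.2 i 0 -
              (if (kv.1, i) ∈ PySem.Set.ofList (hc.map (fun card => (pvCt card, pvIx card))) then 1 else 0)).toNat
            (kv.1 ++ (if i = 13 ∧ kv.1 = "S" then "B" else if i = 13 ∧ kv.1 = "H" then "R" else pvV2S.getD i ""))
        else acc) acc) []
    = pvFlat hc L := by
  rw [PySem.List.foldl_congr_mem _ _
      (fun acc kv => acc ++ (PySem.List.pyRange 0 (PySem.List.len kv.2) 1).flatMap (pvContrib hc kv.1 kv.2)) _ ?_]
  · rw [PySem.List.foldl_append_eq_flatMap]; rfl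
  · intro acc kv _
    have hn : ∀ i : Int, (PySem.List.pyGetD kv.2 i 0 -
        (if (kv.1, i) ∈ PySem.Set.ofList (hc.map (fun card => (pvCt card, pvIx card))) then 1 else 0))
        = pvCnt hc kv.1 kv.2 i := by
      intro i
      unfold pvCnt
      by_cases h : pvTouch hc kv.1 i
      · rw [if_pos ((pv_mem_removed hc kv.1 i).mpr h), if_pos h]
      · rw [if_neg (fun hm => h ((pv_mem_removed hc kv.1 i).mp hm)), if_neg h]
    rw [PySem.List.foldl_congr_mem _ _ (fun acc i => acc ++ pvContrib hc kv.1 kv.2 i) _ ?_]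
    · exact PySem.List.foldl_append_eq_flatMap _ _ _
    · intro acc i _
      rw [hn i]
      unfold pvContrib pvValStr
      by_cases h1 : pvCnt hc kv.1 kv.2 i = 1
      · simp [h1]
      · by_cases h2 : pvCnt hc kv.1 kv.2 i = 2
        · simp [h1, h2]
        · simp [h1, h2]
-- insertBy passes over elements it is not 'before'
theorem pv_insertBy_skip {α : Type} (before : α → α → Bool) (x : α) (ys zs : List α)
    (h : ∀ y ∈ ys, before x y = false) :
    PySem.List.insertBy before x (ys ++ zs) = ys ++ PySem.List.insertBy before x zs := by
  induction ys with
  | nil => simp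
  | cons y ys ih =>
      have hy : before x y = false := h y (by simp)
      have hstep : PySem.List.insertBy before x (y :: (ys ++ zs))
          = y :: PySem.List.insertBy before x (ys ++ zs) := by
        simp [PySem.List.insertBy, hy]
      simp only [List.cons_append, hstep, ih (fun y hy => h y (by simp [hy]))]

theorem pv_insertBy_front {α : Type} (before : α → α → Bool) (x : α) (zs : List α)
    (h : ∀ z ∈ zs, before x z = true) :
    PySem.List.insertBy before x zs = x :: zs := by
  cases zs with
  | nil => rfl
  | cons z zs => simp [PySem.List.insertBy, h z (by simp)]

-- inserting x into value-bucketed flatMap puts it at the end of its own bucket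
theorem pv_insert_flat {α : Type} (κ : α → Int) (x : α) (l : List α) :
    ∀ (n : Nat) (a b : Int), b - a = n → a ≤ κ x → κ x < b →
    PySem.List.insertBy (fun p q => decide (κ p < κ q)) x
        ((PySem.List.pyRange a b 1).flatMap (fun v => l.filter (fun y => decide (κ y = v))))
      = (PySem.List.pyRange a b 1).flatMap
          (fun v => l.filter (fun y => decide (κ y = v)) ++ (if κ x = v then [x] else [])) := by
  intro n
  induction n with
  | zero => intro a b h1 h2 h3; omega
  | succ n ih =>
      intro a b h1 h2 h3
      have hab : a < b := by omega
      rw [PySem.List.pyRange_one_cons hab, List.flatMap_cons, List.flatMap_cons]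
      by_cases hxa : κ x = a
      · rw [pv_insertBy_skip _ _ _ _ ?hskip, pv_insertBy_front _ _ _ ?hfront]
        case hskip =>
          intro y hy
          rw [List.mem_filter] at hy
          have : κ y = a := by simpa using hy.2
          simp [this, hxa]
        case hfront =>
          intro z hz
          rw [List.mem_flatMap] at hz
          obtain ⟨v, hv, hzf⟩ := hz
          rw [PySem.List.mem_pyRange_one] at hv
          rw [List.mem_filter] at hzf
          have : κ z = v := by simpa using hzf.2
          simp [this]; omega
        have hrest : ((PySem.List.pyRange (a+1) b 1).flatMap
              (fun v => l.filter (fun y => decide (κ y = v)) ++ (if κ x = v then [x] else [])))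
            = (PySem.List.pyRange (a+1) b 1).flatMap (fun v => l.filter (fun y => decide (κ y = v))) := by
          rw [List.flatMap, List.flatMap]
          congr 1
          apply List.map_congr_left
          intro v hv
          rw [PySem.List.mem_pyRange_one] at hv
          rw [if_neg (by omega), List.append_nil]
        rw [hrest, if_pos hxa]
        simp
      · have hlt : a < κ x := by omega
        rw [pv_insertBy_skip _ _ _ _ ?hskip2]
        case hskip2 =>
          intro y hy
          rw [List.mem_filter] at hy
          have : κ y = a := by simpa using hy.2
          simp [this]; omega
        rw [ih (a+1) b (by omega) (by omega) h3, if_neg hxa, List.append_nil]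

-- a stable sort by an Int key with known bounds is the concatenation of its value buckets
theorem pv_sorted_decomp {α : Type} (κ : α → Int) (xs : List α) (a b : Int)
    (h : ∀ x ∈ xs, a ≤ κ x ∧ κ x < b) :
    PySem.List.sorted xs κ false
      = (PySem.List.pyRange a b 1).flatMap (fun v => xs.filter (fun y => decide (κ y = v))) := by
  induction xs using List.reverseRecOn with
  | nil => simp [PySem.List.sorted]
  | append_singleton xs x ih =>
      have heq : PySem.List.sorted (xs ++ [x]) κ false
          = PySem.List.insertBy (fun p q => decide (κ p < κ q)) x (PySem.List.sorted xs κ false) := by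
        rw [PySem.List.sorted_eq_foldl_insertBy, PySem.List.sorted_eq_foldl_insertBy,
          List.foldl_append, List.foldl_cons, List.foldl_nil]
      have hx := h x (by simp)
      rw [heq, ih (fun y hy => h y (by simp [hy])),
        pv_insert_flat κ x xs (b - a).toNat a b (by omega) hx.1 hx.2]
      rw [List.flatMap, List.flatMap]
      congr 1
      apply List.map_congr_left
      intro v hv
      rw [List.filter_append]
      congr 1
      simp only [List.filter_cons, List.filter_nil]
      by_cases hxv : κ x = v
      · simp [hxv]
      · simp [hxv]

theorem pv_len_one (s : String) (h : PySem.Str.len s = 1) : ∃ c, s.toList = [c] := by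
  rw [PySem.Str.len_eq] at h
  have : s.toList.length = 1 := by exact_mod_cast h
  exact List.length_eq_one_iff.mp this

theorem pv_vals_toList : ∀ val ∈ pvVals, ∃ c, val.toList = [c] ∧ String.singleton c = val := by
  intro val hval
  fin_cases hval
  · exact ⟨'A', by decide, by decide⟩
  · exact ⟨'2', by decide, by decide⟩
  · exact ⟨'3', by decide, by decide⟩
  · exact ⟨'4', by decide, by decide⟩
  · exact ⟨'5', by decide, by decide⟩
  · exact ⟨'6', by decide, by decide⟩
  · exact ⟨'7', by decide, by decide⟩
  · exact ⟨'8', by decide, by decide⟩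
  · exact ⟨'9', by decide, by decide⟩
  · exact ⟨'T', by decide, by decide⟩
  · exact ⟨'J', by decide, by decide⟩
  · exact ⟨'Q', by decide, by decide⟩
  · exact ⟨'K', by decide, by decide⟩
  · exact ⟨'B', by decide, by decide⟩
  · exact ⟨'R', by decide, by decide⟩


theorem pv_vals_base_contains : ∀ val ∈ pvVals, pvS2V.contains val = true := by decide

theorem pv_contains_bounds (rank : String) (s : String)
    (h : (pvS2V.insert rank 15).contains s = true) :
    2 ≤ (pvS2V.insert rank 15).getD s 0 ∧ (pvS2V.insert rank 15).getD s 0 < 18 := by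
  by_cases hr : s = rank
  · subst hr
    rw [PySem.Dict.getD_insert_self]
    omega
  · rw [PySem.Dict.getD_insert_of_ne _ _ _ hr]
    have hb : pvS2V.contains s = true := by
      rw [PySem.Dict.contains_insert] at h
      simpa [hr] using h
    rw [PySem.Dict.contains_eq_isSome_get?] at hb
    rcases hg : pvS2V.get? s with _ | x
    · rw [hg] at hb; simp at hb
    · rw [PySem.Dict.getD_of_get?_eq_some (h := hg)]
      have hm := PySem.Dict.mem_items_of_get?_eq_some _ hg
      have hit : pvS2V.items = [("2",2),("3",3),("4",4),("5",5),("6",6),("7",7),("8",8),("9",9),("T",10),("J",11),("Q",12),("K",13),("A",14),("B",16),("R",17)] := by decide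
      rw [hit] at hm
      simp only [List.mem_cons, List.not_mem_nil, or_false] at hm
      rcases hm with h'|h'|h'|h'|h'|h'|h'|h'|h'|h'|h'|h'|h'|h'|h' <;> (injection h' with h1 h2; omega)

-- every card in the flat list comes from a contributing row as key ++ value-character
theorem pv_flat_decomp (hc : List String) (L : List (String × List Int))
    (hrows : ∀ kv ∈ L, ∀ j ∈ List.range kv.2.length, pvCnt hc kv.1 kv.2 j ≠ 0 →
        (j : Int) ≤ 13 ∧ ((j : Int) = 13 → kv.1 = "S" ∨ kv.1 = "H")) :
    ∀ x ∈ pvFlat hc L, ∃ kv ∈ L, pvEmits hc kv ∧ ∃ val ∈ pvVals, x = kv.1 ++ val := by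
  intro x hx
  unfold pvFlat at hx
  rw [List.mem_flatMap] at hx
  obtain ⟨kv, hkvL, hx⟩ := hx
  rw [List.mem_flatMap] at hx
  obtain ⟨i, hi, hx⟩ := hx
  rw [PySem.List.mem_pyRange_one] at hi
  unfold pvContrib at hx
  by_cases hn : pvCnt hc kv.1 kv.2 i = 1 ∨ pvCnt hc kv.1 kv.2 i = 2
  · rw [if_pos hn] at hx
    have hxv : x = kv.1 ++ pvValStr kv.1 i := (List.eq_of_mem_replicate hx)
    have hilen : i < (kv.2.length : Int) := by
      simpa [PySem.List.len_eq] using hi.2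
    have hitn : i = ((i.toNat : Nat) : Int) := by omega
    have hmem : i.toNat ∈ List.range kv.2.length := List.mem_range.mpr (by omega)
    have hcnt0 : pvCnt hc kv.1 kv.2 (i.toNat : Int) ≠ 0 := by
      rw [← hitn]; omega
    obtain ⟨h13a, h13b⟩ := hrows kv hkvL i.toNat hmem hcnt0
    rw [← hitn] at h13a h13b
    have hemits : pvEmits hc kv := by
      refine ⟨i.toNat, hmem, ?_⟩
      rw [← hitn]
      exact hn
    have hval : pvValStr kv.1 i ∈ pvVals := by
      unfold pvValStr
      by_cases hs : i = 13 ∧ kv.1 = "S"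
      · rw [if_pos hs]; simp [pvVals]
      · rw [if_neg hs]
        by_cases hh : i = 13 ∧ kv.1 = "H"
        · rw [if_pos hh]; simp [pvVals]
        · rw [if_neg hh]
          have hi13 : i ≠ 13 := by
            intro hi13
            rcases h13b hi13 with h | h
            · exact hs ⟨hi13, h⟩
            · exact hh ⟨hi13, h⟩
          have hlo : 0 ≤ i := hi.1
          have hhi : i ≤ 12 := by omega
          interval_cases i <;> decide
    exact ⟨kv, hkvL, hemits, pvValStr kv.1 i, hval, hxv⟩
  · rw [if_neg hn] at hx
    exact absurd hx (List.not_mem_nil)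

-- the second character of key ++ val
theorem pv_ch1_append_long (k t : String) (h : 2 ≤ k.toList.length) :
    pvCh (k ++ t) 1 = pvCh k 1 := by
  unfold pvCh
  rw [PySem.Str.pyGet?_eq, PySem.Str.pyGet?_eq]
  simp only [PySem.Chars.pyGet?_eq_listPyGet?, String.toList_append]
  have h2 : 1 < (k.toList ++ t.toList).length := by
    rw [List.length_append]; omega
  have e1 : PySem.List.pyGet? (k.toList ++ t.toList) (1 : Int) = some ((k.toList ++ t.toList)[1]'h2) := by
    have := PySem.List.pyGet?_ofNat (xs := k.toList ++ t.toList) (n := 1) h2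
    simpa using this
  have e2 : PySem.List.pyGet? k.toList (1 : Int) = some (k.toList[1]'(by omega)) := by
    have := PySem.List.pyGet?_ofNat (xs := k.toList) (n := 1) (by omega)
    simpa using this
  rw [e1, e2]
  simp only [Option.getD_some]
  exact List.getElem_append_left (by omega)

theorem pv_ch1_append_one (k val : String) (kc vc : Char)
    (hk : k.toList = [kc]) (hv : val.toList = [vc]) :
    pvCh (k ++ val) 1 = vc := by
  unfold pvCh
  rw [PySem.Str.pyGet?_eq]
  simp only [PySem.Chars.pyGet?_eq_listPyGet?, String.toList_append, hk, hv]
  have hpg : PySem.List.pyGet? [kc, vc] (1 : Int) = some vc := by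
    have := PySem.List.pyGet?_ofNat (xs := [kc, vc]) (n := 1) (by simp)
    simpa using this
  simp only [List.cons_append, List.nil_append]
  rw [hpg]
  rfl

-- bound on the sort value for every card of the flat list
theorem pv_keyA_bounds (rank : String) (hc : List String) (L : List (String × List Int))
    (hrows : ∀ kv ∈ L,
        (∀ j ∈ List.range kv.2.length, pvCnt hc kv.1 kv.2 j ≠ 0 →
            (j : Int) ≤ 13 ∧ ((j : Int) = 13 → kv.1 = "S" ∨ kv.1 = "H"))
        ∧ (pvEmits hc kv → 1 ≤ PySem.Str.len kv.1
            ∧ (PySem.Str.len kv.1 = 1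
               ∨ (pvS2V.insert rank 15).contains (String.singleton (pvCh kv.1 1)) = true))) :
    ∀ x ∈ pvFlat hc L,
      2 ≤ (pvS2V.insert rank 15).getD (String.singleton (pvCh x 1)) 0
      ∧ (pvS2V.insert rank 15).getD (String.singleton (pvCh x 1)) 0 < 18 := by
  intro x hx
  obtain ⟨kv, hkvL, hemits, val, hval, hxv⟩ :=
    pv_flat_decomp hc L (fun kv hkv => (hrows kv hkv).1) x hx
  obtain ⟨hlen1, hdisj⟩ := (hrows kv hkvL).2 hemits
  obtain ⟨vc, hvc, hvs⟩ := pv_vals_toList val hval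
  by_cases hone : PySem.Str.len kv.1 = 1
  · obtain ⟨kc, hkc⟩ := pv_len_one kv.1 hone
    have hch : pvCh x 1 = vc := by
      rw [hxv]; exact pv_ch1_append_one kv.1 val kc vc hkc hvc
    rw [hch, hvs]
    apply pv_contains_bounds
    rw [PySem.Dict.contains_insert, pv_vals_base_contains val hval, Bool.or_true]
  · have hcont : (pvS2V.insert rank 15).contains (String.singleton (pvCh kv.1 1)) = true := by
      rcases hdisj with h | h
      · exact absurd h hone
      · exact h
    have hlen2 : 2 ≤ kv.1.toList.length := by
      rw [PySem.Str.len_eq] at hlen1 hone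
      omega
    have hch : pvCh x 1 = pvCh kv.1 1 := by
      rw [hxv]; exact pv_ch1_append_long kv.1 val hlen2
    rw [hch]
    exact pv_contains_bounds rank _ hcont

-- A's grouping scan, named
def pvStep (st : List (List String) × List String × String) (cards : String) :
    List (List String) × List String × String :=
  if pvCharStr cards ≠ st.2.2 then (st.1 ++ [st.2.1], [cards], pvCharStr cards)
  else (st.1, st.2.1 ++ [cards], st.2.2)

-- B's grouping loop, named
def pvStepB (groups : List (List String)) (card : String) : List (List String) :=
  if pvCharStr card = pvCharStr ((groups.getLastD []).getLastD "") then
    groups.dropLast ++ [groups.getLastD [] ++ [card]]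
  else groups ++ [[card]]

-- the rank character of a 1-character string is itself
theorem pv_charStr_singleton (c : Char) : pvCharStr (String.singleton c) = String.singleton c := by
  unfold pvCharStr pvCh
  rw [PySem.Str.pyGet?_eq]
  simp [PySem.Chars.pyGet?_eq_listPyGet?, String.toList_singleton, PySem.List.pyGet?, PySem.List.pyIdx?]

-- both grouping loops agree step for step: A's state (done, tmp, pre) corresponds to
-- B's group list done ++ [tmp], with pre the rank character of tmp's last card
theorem pv_scan_eq : ∀ (rs : List String) (done : List (List String)) (tmp : List String) (pre : String),
    tmp ≠ [] → pvCharStr (tmp.getLastD "") = pre →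
    ((rs.foldl pvStep (done, tmp, pre)).1 ++ [(rs.foldl pvStep (done, tmp, pre)).2.1])
      = rs.foldl pvStepB (done ++ [tmp]) := by
  intro rs
  induction rs with
  | nil => intro done tmp pre _ _; simp
  | cons c rest ih =>
      intro done tmp pre htne hpre
      rw [List.foldl_cons, List.foldl_cons]
      have hget : (done ++ [tmp]).getLastD [] = tmp := List.getLastD_concat ..
      by_cases h : pvCharStr c = pre
      · have hA : pvStep (done, tmp, pre) c = (done, tmp ++ [c], pre) := by
          simp only [pvStep]
          rw [if_neg (not_not_intro h)]
        have hB : pvStepB (done ++ [tmp]) c = done ++ [tmp ++ [c]] := by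
          simp only [pvStepB, hget]
          rw [if_pos (by rw [hpre]; exact h), List.dropLast_concat]
        rw [hA, hB]
        exact ih done (tmp ++ [c]) pre (by simp) (by rw [List.getLastD_concat]; exact h)
      · have hA : pvStep (done, tmp, pre) c = (done ++ [tmp], [c], pvCharStr c) := by
          simp only [pvStep]
          rw [if_pos h]
        have hB : pvStepB (done ++ [tmp]) c = (done ++ [tmp]) ++ [[c]] := by
          simp only [pvStepB, hget]
          rw [if_neg (by rw [hpre]; exact h)]
        rw [hA, hB]
        exact ih (done ++ [tmp]) [c] (pvCharStr c) (by simp) (by simp)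

-- the two grouping tails agree on any non-empty ordered list
theorem pv_tail_eq (r0 : String) (rs : List String) :
    ((rs.foldl pvStep (([] : List (List String)), [String.singleton (pvCh r0 (-1))], String.singleton (pvCh r0 (-1)))).1
      ++ [(rs.foldl pvStep (([] : List (List String)), [String.singleton (pvCh r0 (-1))], String.singleton (pvCh r0 (-1)))).2.1])
    = rs.foldl pvStepB [[String.singleton (pvCh r0 (-1))]] := by
  have := pv_scan_eq rs [] [String.singleton (pvCh r0 (-1))] (String.singleton (pvCh r0 (-1)))
    (by simp) (by rw [show ([String.singleton (pvCh r0 (-1))].getLastD "") = String.singleton (pvCh r0 (-1)) from rfl]; exact pv_charStr_singleton _)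
  simpa using this

theorem pv_main (handcards : List String) (remaincards : List (String × List Int)) (rank : String)
    (hpre : Pre_rest_cards handcards remaincards rank) :
    rest_cards handcards remaincards rank = rest_cards_alt handcards remaincards rank := by
  obtain ⟨hnd, hrows, hok, hne⟩ := hpre
  unfold rest_cards rest_cards_alt
  simp only []
  rw [pv_dec_items remaincards hnd handcards (fun c hc => (hok c hc).2.2)]
  rw [pv_flatA handcards remaincards]
  rw [pv_items_ofList remaincards hnd, pv_flatB handcards remaincards]
  rw [pv_sorted_decomp (fun item => (pvS2V.insert rank 15).getD (String.singleton (pvCh item 1)) 0)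
      (pvFlat handcards remaincards) 2 18
      (pv_keyA_bounds rank handcards remaincards hrows)]
  rcases hO : (PySem.List.pyRange 2 18 1).flatMap (fun v =>
      (pvFlat handcards remaincards).filter (fun c =>
        decide ((pvS2V.insert rank 15).getD (String.singleton (pvCh c 1)) 0 = v)))
    with _ | ⟨r0, rs⟩
  · rfl
  · exact pv_tail_eq r0 rs

-- ===== VERDICT (by name: the statement is the Claim_ definition above) =====
theorem rest_cards_spec : Claim_equal_rest_cards := by
  intro handcards remaincards rank _ hpre
  unfold Spec_rest_cards
  exact pv_main handcards remaincards rank hpre
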